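-- pv_equiv track=rewrite | github.com/awilkins/advent | python/advent/day_24/hex_tiles.py | parse_moves
-- ===== SOURCE A (Python) =====
-- def parse_moves(line: str):
--
--     ii = 0
--     while ii < len(line):
--         c = line[ii]
--         if c == "n" or c == "s":
--             yield line[ii:ii+2]
--             ii += 2
--         else:
--             yield line[ii]
--             ii += 1
-- ===== SOURCE B (Python) =====
-- def parse_moves(line: str):
--     # Single-pass state machine over characters (no indexing/slicing):
--     # an 'n'/'s' is held as a pending prefix and joined with the next char.
--     pending = None
--     for c in line:
--         if pending is not None:
--             yield pending + c
--             pending = None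
--         elif c == "n" or c == "s":
--             pending = c
--         else:
--             yield c
--     if pending is not None:
--         yield pending
-- ===== Notes on version B (the rewrite author's own statement) =====
-- stated objective: alternative
-- what changed: Replaced the index-driven while loop with two-char slicing by a single-pass state-machine generator over the characters that holds a pending 'n'/'s' prefix and joins it with the next character.
import Mathlib
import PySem

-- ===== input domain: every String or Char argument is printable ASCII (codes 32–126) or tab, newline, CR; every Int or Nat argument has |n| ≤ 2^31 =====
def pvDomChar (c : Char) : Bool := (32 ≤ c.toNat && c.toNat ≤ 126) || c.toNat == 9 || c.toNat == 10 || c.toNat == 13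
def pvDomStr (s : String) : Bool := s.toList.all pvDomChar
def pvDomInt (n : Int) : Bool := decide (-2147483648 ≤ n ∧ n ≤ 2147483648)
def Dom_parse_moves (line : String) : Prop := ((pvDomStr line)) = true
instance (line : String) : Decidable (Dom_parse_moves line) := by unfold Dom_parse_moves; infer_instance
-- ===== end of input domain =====

-- B replaces A's index-and-slice while loop by a single-pass pending-prefix state machine over the characters (alternative decomposition, same cost).


-- ===== PORT A =====
-- while ii < len(line): slice out two chars after 'n'/'s', else one char
def pvA_loop (cs : List Char) (ii : Nat) : List String :=
  if h : ii < cs.length then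
    let c := cs[ii]
    if c = 'n' ∨ c = 's' then
      String.ofList (PySem.Chars.slice cs (some (ii : Int)) (some ((ii : Int) + 2))) ::
        pvA_loop cs (ii + 2)
    else
      String.ofList [c] :: pvA_loop cs (ii + 1)
  else []
termination_by cs.length - ii

def parse_moves (line : String) : List String := pvA_loop line.toList 0

-- ===== PORT B =====
-- single pass; the Option Char is Source B's 'pending' variable
def pvB_go : Option Char → List Char → List String
  | some p, [] => [String.ofList [p]]
  | none, [] => []
  | some p, c :: rest => String.ofList [p, c] :: pvB_go none rest
  | none, c :: rest =>
      if c = 'n' ∨ c = 's' then pvB_go (some c) rest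
      else String.ofList [c] :: pvB_go none rest

def parse_moves_alt (line : String) : List String := pvB_go none line.toList

-- ===== PRECONDITION & SPEC =====
def Spec_parse_moves (line : String) (out : List String) : Prop := out = parse_moves_alt line
instance (line : String) (out : List String) : Decidable (Spec_parse_moves line out) := by unfold Spec_parse_moves; infer_instance

-- ===== CLAIM (what is proved, stated in full; the proofs are below) =====
def Claim_equal_parse_moves : Prop := ∀ (line : String), Dom_parse_moves line → Spec_parse_moves line (parse_moves line)

-- ===== LEMMAS AND PROOFS =====

theorem pvA_loop_eq (cs : List Char) : ∀ n ii, cs.length - ii ≤ n →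
    pvA_loop cs ii = pvB_go none (cs.drop ii) := by
  intro n
  induction n with
  | zero =>
      intro ii hle
      have hge : cs.length ≤ ii := by omega
      rw [pvA_loop, dif_neg (by omega), List.drop_eq_nil_of_le hge, pvB_go]
  | succ n ih =>
      intro ii hle
      by_cases h : ii < cs.length
      · have hdrop : cs.drop ii = cs[ii] :: cs.drop (ii + 1) :=
          List.drop_eq_getElem_cons h
        rw [pvA_loop, dif_pos h]
        by_cases hns : cs[ii] = 'n' ∨ cs[ii] = 's'
        · rw [if_pos hns, hdrop, pvB_go, if_pos hns]
          have hslice : PySem.Chars.slice cs (some (ii : Int)) (some ((ii : Int) + 2))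
              = (cs.drop ii).take 2 := by
            have := PySem.List.slice_toNat (xs := cs) (a := (ii : Int))
              (b := (ii : Int) + 2) (by positivity) (by positivity)
            simpa [show ((ii : Int) + 2).toNat - ii = 2 from by omega] using this
          rcases hrest : cs.drop (ii + 1) with _ | ⟨d, t⟩
          · -- ii is the last index
            have hlen : cs.length = ii + 1 := by
              have := congrArg List.length hrest
              simp at this; omega
            rw [pvB_go, hslice, hdrop, hrest]
            rw [pvA_loop, dif_neg (by omega)]
            simp
          · rw [pvB_go, hslice, hdrop, hrest]
            have ht : cs.drop (ii + 2) = t := by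
              have h1 := congrArg (List.drop 1) hrest
              rw [List.drop_drop] at h1
              simpa using h1
            rw [ih (ii + 2) (by omega), ht]
            simp
        · rw [if_neg hns, hdrop, pvB_go, if_neg hns, ih (ii + 1) (by omega)]
      · rw [pvA_loop, dif_neg h, List.drop_eq_nil_of_le (by omega), pvB_go]

-- ===== VERDICT (by name: the statement is the Claim_ definition above) =====
theorem parse_moves_spec : Claim_equal_parse_moves := by
  intro line _
  unfold Spec_parse_moves parse_moves parse_moves_alt
  simpa using pvA_loop_eq line.toList line.toList.length 0 (by omega)
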